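-- pv_equiv track=rewrite | github.com/inaciovasquez2020/pachner-invariant | tools/generate_bounded_g2_witness_data.py | path_edges_to_root
-- ===== SOURCE A (Python) =====
-- def path_edges_to_root(
--     v: int,
--     parent: dict[int, int | None],
--     parent_edge: dict[int, int | None],
-- ) -> dict[int, list[int]]:
--     out: dict[int, list[int]] = {}
--     cur = v
--     edges: list[int] = []
--
--     while True:
--         out[cur] = list(edges)
--         p = parent[cur]
--         if p is None:
--             break
--         pe = parent_edge[cur]
--         if pe is None:
--             break
--         edges.append(pe)
--         cur = p
--
--     return out
-- ===== SOURCE B (Python) =====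
-- def path_edges_to_root(v, parent, parent_edge):
--     # Descend the chain pushing (node, edge) frames; then unwind BACK TO FRONT,
--     # each frame prepending its edge to every deeper path, and take dict() of it.
--     frames = []
--     cur = v
--     while parent[cur] is not None and parent_edge[cur] is not None:
--         frames.append((cur, parent_edge[cur]))
--         cur = parent[cur]
--     acc = [(cur, [])]
--     for n, pe in reversed(frames):
--         acc = [(n, [])] + [(m, [pe] + q) for m, q in acc]
--     return dict(acc)
-- ===== Notes on version B (the rewrite author's own statement) =====
-- stated objective: alternative
-- what changed: B replaces A's forward walk that snapshot-copies the growing edge list into the dict at each step by a two-phase back-to-front construction: it descends once pushing (node, edge) frames, then unwinds the frames in reverse, each frame prepending its edge to every deeper path, and returns dict() of the resulting pair list.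
import Mathlib
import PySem

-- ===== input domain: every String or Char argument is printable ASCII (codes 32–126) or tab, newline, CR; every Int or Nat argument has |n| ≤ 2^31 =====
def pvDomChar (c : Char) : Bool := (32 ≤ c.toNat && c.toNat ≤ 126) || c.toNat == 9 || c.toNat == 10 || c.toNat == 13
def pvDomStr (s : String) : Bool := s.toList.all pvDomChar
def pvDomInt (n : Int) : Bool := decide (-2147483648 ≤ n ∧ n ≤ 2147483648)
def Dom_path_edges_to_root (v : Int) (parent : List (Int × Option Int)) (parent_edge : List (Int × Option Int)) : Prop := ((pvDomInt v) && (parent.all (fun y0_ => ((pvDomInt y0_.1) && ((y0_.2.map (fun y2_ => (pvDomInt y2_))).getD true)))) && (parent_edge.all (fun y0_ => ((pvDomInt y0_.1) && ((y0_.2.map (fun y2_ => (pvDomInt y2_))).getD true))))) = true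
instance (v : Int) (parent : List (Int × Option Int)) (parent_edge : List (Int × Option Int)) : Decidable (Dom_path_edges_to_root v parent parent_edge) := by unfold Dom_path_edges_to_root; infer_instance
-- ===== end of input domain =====

-- B builds the output back to front: one descent collecting (node, edge) frames, then a reverse
-- unwind prepending each frame's edge to every deeper path, instead of A's forward walk that
-- snapshot-copies the growing edge list into the dict at each step (objective: alternative).

-- ===== PORT A =====
-- A's while-True loop; fuel (|parent|+1) only makes the recursion total — inside Pre_ it never runs out.
def pvGoA (pd ped : PySem.Dict Int (Option Int)) : Nat → PySem.Dict Int (List Int) → Int → List Int → PySem.Dict Int (List Int)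
  | 0, out, _, _ => out
  | fuel + 1, out, cur, edges =>
    let out := out.insert cur edges          -- out[cur] = list(edges)
    match pd.get? cur with
    | none => out                            -- KeyError (excluded by Pre_)
    | some none => out                       -- p is None: break
    | some (some p) =>
      match ped.get? cur with
      | none => out                          -- KeyError (excluded by Pre_)
      | some none => out                     -- pe is None: break
      | some (some pe) => pvGoA pd ped fuel out p (edges ++ [pe])

def path_edges_to_root (v : Int) (parent : List (Int × Option Int)) (parent_edge : List (Int × Option Int)) : List (Int × List Int) :=
  (pvGoA (PySem.Dict.ofList parent) (PySem.Dict.ofList parent_edge) (parent.length + 1) PySem.Dict.empty v []).items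

-- ===== PORT B =====
-- Source B's descent: the while loop pushing (cur, parent_edge[cur]) frames; same fuel guard for totality.
def pvDescendB (pd ped : PySem.Dict Int (Option Int)) : Nat → Int → List (Int × Int) → List (Int × Int) × Int
  | 0, cur, fs => (fs, cur)
  | fuel + 1, cur, fs =>
    match pd.get? cur with
    | none => (fs, cur)                      -- KeyError (excluded by Pre_)
    | some none => (fs, cur)                 -- parent[cur] is None: loop condition false
    | some (some p) =>
      match ped.get? cur with
      | none => (fs, cur)                    -- KeyError (excluded by Pre_)
      | some none => (fs, cur)               -- parent_edge[cur] is None: loop condition false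
      | some (some pe) => pvDescendB pd ped fuel p (fs ++ [(cur, pe)])

def path_edges_to_root_alt (v : Int) (parent : List (Int × Option Int)) (parent_edge : List (Int × Option Int)) : List (Int × List Int) :=
  -- frames, terminal = the descent; acc = reverse unwind; return dict(acc)
  let r := pvDescendB (PySem.Dict.ofList parent) (PySem.Dict.ofList parent_edge) (parent.length + 1) v []
  let acc := r.1.reverse.foldl
    (fun acc q => (q.1, ([] : List Int)) :: acc.map (fun m => (m.1, q.2 :: m.2)))
    [(r.2, [])]
  (PySem.Dict.ofList acc).items

-- ===== PRECONDITION & SPEC =====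
-- Pre_ is exactly the set of inputs on which Python A returns normally: following parent pointers from v,
-- every lookup is defined (no KeyError) and a stopping node (None parent or None edge) is reached.  The
-- |parent|+1 step bound is exact, not a size cap: a chain that runs longer must revisit a key, and then
-- A loops forever.  Outside Pre_, A raises KeyError or diverges.
def pvStops (pd ped : PySem.Dict Int (Option Int)) : Nat → Int → Bool
  | 0, _ => false
  | fuel + 1, cur =>
    match pd.get? cur with
    | none => false
    | some none => true
    | some (some p) =>
      match ped.get? cur with
      | none => false
      | some none => true
      | some (some _) => pvStops pd ped fuel p

def Pre_path_edges_to_root (v : Int) (parent : List (Int × Option Int)) (parent_edge : List (Int × Option Int)) : Prop :=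
  pvStops (PySem.Dict.ofList parent) (PySem.Dict.ofList parent_edge) (parent.length + 1) v = true

instance (v : Int) (parent : List (Int × Option Int)) (parent_edge : List (Int × Option Int)) : Decidable (Pre_path_edges_to_root v parent parent_edge) := by unfold Pre_path_edges_to_root; infer_instance

def pvWitness_path_edges_to_root : Int × (List (Int × Option Int)) × (List (Int × Option Int)) :=
  (0, [(0, some 1), (1, none)], [(0, some 5), (1, none)])

def Spec_path_edges_to_root (v : Int) (parent : List (Int × Option Int)) (parent_edge : List (Int × Option Int)) (out : List (Int × List Int)) : Prop := out = path_edges_to_root_alt v parent parent_edge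
instance (v : Int) (parent : List (Int × Option Int)) (parent_edge : List (Int × Option Int)) (out : List (Int × List Int)) : Decidable (Spec_path_edges_to_root v parent parent_edge out) := by unfold Spec_path_edges_to_root; infer_instance

-- ===== CLAIM (what is proved, stated in full; the proofs are below) =====
def Claim_equal_path_edges_to_root : Prop := ∀ (v : Int) (parent : List (Int × Option Int)) (parent_edge : List (Int × Option Int)), Dom_path_edges_to_root v parent parent_edge → Pre_path_edges_to_root v parent parent_edge → Spec_path_edges_to_root v parent parent_edge (path_edges_to_root v parent parent_edge)

-- ===== LEMMAS AND PROOFS =====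

-- The (key, value) stream A inserts, parameterised by the edge prefix accumulated so far.
def pvPairs (pd ped : PySem.Dict Int (Option Int)) : Nat → Int → List Int → List (Int × List Int)
  | 0, _, _ => []
  | fuel + 1, cur, pref =>
    match pd.get? cur with
    | none => [(cur, pref)]
    | some none => [(cur, pref)]
    | some (some p) =>
      match ped.get? cur with
      | none => [(cur, pref)]
      | some none => [(cur, pref)]
      | some (some pe) => (cur, pref) :: pvPairs pd ped fuel p (pref ++ [pe])

-- The frame list and terminal node of B's descent, in cons form (proof-side spec).
def pvFrames (pd ped : PySem.Dict Int (Option Int)) : Nat → Int → List (Int × Int)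
  | 0, _ => []
  | fuel + 1, cur =>
    match pd.get? cur with
    | none => []
    | some none => []
    | some (some p) =>
      match ped.get? cur with
      | none => []
      | some none => []
      | some (some pe) => (cur, pe) :: pvFrames pd ped fuel p

def pvTerm (pd ped : PySem.Dict Int (Option Int)) : Nat → Int → Int
  | 0, cur => cur
  | fuel + 1, cur =>
    match pd.get? cur with
    | none => cur
    | some none => cur
    | some (some p) =>
      match ped.get? cur with
      | none => cur
      | some none => cur
      | some (some _) => pvTerm pd ped fuel p

theorem pvGoA_eq (pd ped : PySem.Dict Int (Option Int)) :
    ∀ (fuel : Nat) (cur : Int) (pref : List Int) (d : PySem.Dict Int (List Int)),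
      pvGoA pd ped fuel d cur pref =
        (pvPairs pd ped fuel cur pref).foldl (fun d q => d.insert q.1 q.2) d := by
  intro fuel
  induction fuel with
  | zero => intro cur pref d; simp [pvGoA, pvPairs]
  | succ fuel ih =>
    intro cur pref d
    simp only [pvGoA, pvPairs]
    rcases h1 : pd.get? cur with _ | (_ | p) <;> simp
    rcases h2 : ped.get? cur with _ | (_ | pe) <;> simp [ih]

theorem pvDescendB_eq (pd ped : PySem.Dict Int (Option Int)) :
    ∀ (fuel : Nat) (cur : Int) (fs : List (Int × Int)),
      pvDescendB pd ped fuel cur fs = (fs ++ pvFrames pd ped fuel cur, pvTerm pd ped fuel cur) := by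
  intro fuel
  induction fuel with
  | zero => intro cur fs; simp [pvDescendB, pvFrames, pvTerm]
  | succ fuel ih =>
    intro cur fs
    simp only [pvDescendB, pvFrames, pvTerm]
    rcases h1 : pd.get? cur with _ | (_ | p) <;> simp
    rcases h2 : ped.get? cur with _ | (_ | pe) <;> simp [ih]

-- B's reverse unwind of the frames, mapped under an outer edge prefix, is exactly A's pair stream.
theorem pvUnwind_eq (pd ped : PySem.Dict Int (Option Int)) :
    ∀ (fuel : Nat) (cur : Int) (pref : List Int),
      pvStops pd ped fuel cur = true →
      ((pvFrames pd ped fuel cur).foldr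
          (fun q acc => (q.1, ([] : List Int)) :: acc.map (fun m => (m.1, q.2 :: m.2)))
          [(pvTerm pd ped fuel cur, [])]).map (fun m => (m.1, pref ++ m.2))
        = pvPairs pd ped fuel cur pref := by
  intro fuel
  induction fuel with
  | zero => intro cur pref h; simp [pvStops] at h
  | succ fuel ih =>
    intro cur pref h
    simp only [pvStops] at h
    simp only [pvFrames, pvTerm, pvPairs]
    rcases h1 : pd.get? cur with _ | (_ | p)
    · simp [h1] at h
    · simp
    · simp only [h1] at h ⊢
      rcases h2 : ped.get? cur with _ | (_ | pe)
      · simp [h2] at h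
      · simp
      · simp only [h2] at h ⊢
        simp only [List.foldr_cons, List.map_cons, List.map_map]
        have hcomp :
            ((fun m : Int × List Int => (m.1, pref ++ m.2)) ∘ fun m : Int × List Int => (m.1, pe :: m.2))
              = fun m : Int × List Int => (m.1, (pref ++ [pe]) ++ m.2) := by
          funext m; simp
        rw [hcomp, ih p (pref ++ [pe]) h]
        simp

-- ===== VERDICT (by name: the statement is the Claim_ definition above) =====
theorem path_edges_to_root_spec : Claim_equal_path_edges_to_root := by
  intro v parent parent_edge _ hpre
  unfold Spec_path_edges_to_root path_edges_to_root path_edges_to_root_alt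
  rw [pvGoA_eq, pvDescendB_eq]
  have h := pvUnwind_eq (PySem.Dict.ofList parent) (PySem.Dict.ofList parent_edge)
    (parent.length + 1) v [] hpre
  simp only [List.nil_append, Prod.mk.eta, List.map_id_fun', id] at h
  simp only [List.nil_append, List.foldl_reverse]
  rw [h]
  rfl
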